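-- pv_equiv track=rewrite | github.com/qiliRedHat/etcd-performance-analyzer | elt/etcd_analyzer_elt_utility.py | assess_bottleneck_severity
-- ===== SOURCE A (Python) =====
-- from typing import Dict, Any, List, Union, Tuple
--
-- def assess_bottleneck_severity(bottlenecks_list: List[Dict[str, Any]]) -> str:
--     """Assess overall severity of a list of bottlenecks"""
--     if not bottlenecks_list:
--         return "none"
--
--     severities = [b.get('severity', '').lower() for b in bottlenecks_list]
--
--     if 'critical' in severities or 'high' in severities:
--         return "critical"
--     elif 'medium' in severities:
--         return "medium"
--     elif 'low' in severities:
--         return "low"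
--     else:
--         return "unknown"
-- ===== SOURCE B (Python) =====
-- def assess_bottleneck_severity(bottlenecks_list):
--     """Assess overall severity of a list of bottlenecks (single max-rank pass)."""
--     if not bottlenecks_list:
--         return "none"
--     prio = {'critical': 3, 'high': 3, 'medium': 2, 'low': 1}
--     best = 0
--     for b in bottlenecks_list:
--         best = max(best, prio.get(b.get('severity', '').lower(), 0))
--     return ('unknown', 'low', 'medium', 'critical')[best]
-- ===== Notes on version B (the rewrite author's own statement) =====
-- stated objective: alternative
-- what changed: Replaces building a severities list and scanning it up to four times for membership with a single pass that keeps the maximum severity rank (via a priority map) and translates the final rank back to a label.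
import Mathlib
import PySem

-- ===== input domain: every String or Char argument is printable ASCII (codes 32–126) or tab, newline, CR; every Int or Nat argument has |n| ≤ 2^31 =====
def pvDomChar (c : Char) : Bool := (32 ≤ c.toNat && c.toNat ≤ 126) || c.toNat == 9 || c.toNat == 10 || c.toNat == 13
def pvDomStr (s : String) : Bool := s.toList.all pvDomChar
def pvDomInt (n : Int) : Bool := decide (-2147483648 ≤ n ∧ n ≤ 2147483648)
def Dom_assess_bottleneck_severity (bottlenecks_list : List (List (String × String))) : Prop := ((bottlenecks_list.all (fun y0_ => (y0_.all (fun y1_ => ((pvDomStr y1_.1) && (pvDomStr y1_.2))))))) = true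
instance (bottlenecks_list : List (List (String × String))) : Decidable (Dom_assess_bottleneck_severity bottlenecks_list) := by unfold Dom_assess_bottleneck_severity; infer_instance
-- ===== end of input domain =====

-- B replaces A's severities list plus up-to-four membership scans by a single
-- max-rank pass with a priority map and a final rank→label translation (objective: alternative).

-- ===== PORT A =====
def assess_bottleneck_severity (bottlenecks_list : List (List (String × String))) : String :=
  if bottlenecks_list.isEmpty then "none"
  else
    let severities := bottlenecks_list.map
      (fun b => PySem.Str.lower ((PySem.Dict.mk b).getD "severity" ""))
    if severities.contains "critical" || severities.contains "high" then "critical"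
    else if severities.contains "medium" then "medium"
    else if severities.contains "low" then "low"
    else "unknown"

-- ===== PORT B =====
def pvPrio : PySem.Dict String Nat :=
  PySem.Dict.mk [("critical", 3), ("high", 3), ("medium", 2), ("low", 1)]

def pvLabels : List String := ["unknown", "low", "medium", "critical"]

def assess_bottleneck_severity_alt (bottlenecks_list : List (List (String × String))) : String :=
  if bottlenecks_list.isEmpty then "none"
  else
    let best := bottlenecks_list.foldl
      (fun m b =>
        Nat.max m (pvPrio.getD (PySem.Str.lower ((PySem.Dict.mk b).getD "severity" "")) 0)) 0
    -- labels[best]; best ≤ 3 always, so the total indexing form is exact here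
    PySem.List.pyGetD pvLabels (best : Int) "unknown"

-- ===== PRECONDITION & SPEC =====
def Spec_assess_bottleneck_severity (bottlenecks_list : List (List (String × String))) (out : String) : Prop := out = assess_bottleneck_severity_alt bottlenecks_list
instance (bottlenecks_list : List (List (String × String))) (out : String) : Decidable (Spec_assess_bottleneck_severity bottlenecks_list out) := by unfold Spec_assess_bottleneck_severity; infer_instance

-- ===== CLAIM (what is proved, stated in full; the proofs are below) =====
def Claim_equal_assess_bottleneck_severity : Prop := ∀ (bottlenecks_list : List (List (String × String))), Dom_assess_bottleneck_severity bottlenecks_list → Spec_assess_bottleneck_severity bottlenecks_list (assess_bottleneck_severity bottlenecks_list)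

-- ===== LEMMAS AND PROOFS =====

-- the severity string A and B both extract from one bottleneck dict
def pvSev (b : List (String × String)) : String :=
  PySem.Str.lower ((PySem.Dict.mk b).getD "severity" "")

-- the rank B assigns to one severity string
def pvRank (s : String) : Nat := pvPrio.getD s 0

lemma pvRank_eq (s : String) :
    pvRank s = (if s = "critical" then 3 else if s = "high" then 3
                else if s = "medium" then 2 else if s = "low" then 1 else 0) := by
  by_cases h1 : s = "critical"
  · subst h1; decide
  by_cases h2 : s = "high"
  · subst h2; decide
  by_cases h3 : s = "medium"
  · subst h3; decide
  by_cases h4 : s = "low"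
  · subst h4; decide
  have c1 : ¬ (("critical" == s) = true) := fun h => h1 ((beq_iff_eq.mp h).symm)
  have c2 : ¬ (("high" == s) = true) := fun h => h2 ((beq_iff_eq.mp h).symm)
  have c3 : ¬ (("medium" == s) = true) := fun h => h3 ((beq_iff_eq.mp h).symm)
  have c4 : ¬ (("low" == s) = true) := fun h => h4 ((beq_iff_eq.mp h).symm)
  rw [pvRank, pvPrio, PySem.Dict.getD_eq_get?_getD,
      PySem.Dict.get?_mk_cons, if_neg c1, PySem.Dict.get?_mk_cons, if_neg c2,
      PySem.Dict.get?_mk_cons, if_neg c3, PySem.Dict.get?_mk_cons, if_neg c4,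
      if_neg h1, if_neg h2, if_neg h3, if_neg h4]
  simp [PySem.Dict.get?]

lemma pvRank_le (s : String) : pvRank s ≤ 3 := by
  rw [pvRank_eq]; split_ifs <;> omega

lemma pvRank3_iff (s : String) : 3 ≤ pvRank s ↔ s = "critical" ∨ s = "high" := by
  rw [pvRank_eq]; split_ifs <;> simp_all

lemma pvRank2_iff (s : String) :
    2 ≤ pvRank s ↔ s = "critical" ∨ s = "high" ∨ s = "medium" := by
  rw [pvRank_eq]; split_ifs <;> simp_all

lemma pvRank1_iff (s : String) :
    1 ≤ pvRank s ↔ s = "critical" ∨ s = "high" ∨ s = "medium" ∨ s = "low" := by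
  rw [pvRank_eq]; split_ifs <;> simp_all

lemma le_foldl_max (k : Nat) (l : List (List (String × String))) (a : Nat) :
    k ≤ l.foldl (fun m b => Nat.max m (pvRank (pvSev b))) a ↔
      k ≤ a ∨ ∃ b ∈ l, k ≤ pvRank (pvSev b) := by
  induction l generalizing a with
  | nil => simp
  | cons x xs ih => simp [List.foldl_cons, ih, or_assoc]

lemma foldl_max_le (l : List (List (String × String))) (a : Nat) (ha : a ≤ 3) :
    l.foldl (fun m b => Nat.max m (pvRank (pvSev b))) a ≤ 3 := by
  induction l generalizing a with
  | nil => simpa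
  | cons x xs ih => exact ih _ (max_le ha (pvRank_le _))

-- ===== VERDICT (by name: the statement is the Claim_ definition above) =====
theorem assess_bottleneck_severity_spec : Claim_equal_assess_bottleneck_severity := by
  intro l _
  unfold Spec_assess_bottleneck_severity assess_bottleneck_severity assess_bottleneck_severity_alt
  by_cases hl : l.isEmpty
  · simp [hl]
  simp only [hl, Bool.false_eq_true, if_false]
  have hsev : (fun b => PySem.Str.lower ((PySem.Dict.mk b).getD "severity" "")) = pvSev := rfl
  have hfold : (fun (m : Nat) b => Nat.max m (pvPrio.getD (PySem.Str.lower ((PySem.Dict.mk b).getD "severity" "")) 0))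
      = (fun m b => Nat.max m (pvRank (pvSev b))) := rfl
  rw [hsev, hfold]
  set M := l.foldl (fun m b => Nat.max m (pvRank (pvSev b))) 0 with hMdef
  have hex : ∀ k : Nat, 0 < k → (k ≤ M ↔ ∃ b ∈ l, k ≤ pvRank (pvSev b)) := by
    intro k hk
    rw [hMdef, le_foldl_max]
    constructor
    · rintro (h | h)
      · omega
      · exact h
    · exact Or.inr
  have hMle : M ≤ 3 := foldl_max_le l 0 (by omega)
  have hmem : ∀ s : String, ((l.map pvSev).contains s = true) ↔ ∃ b ∈ l, pvSev b = s := by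
    intro s; simp
  by_cases h3 : 3 ≤ M
  · have hc : ((l.map pvSev).contains "critical" || (l.map pvSev).contains "high") = true := by
      rcases (hex 3 (by omega)).mp h3 with ⟨b, hb, hr⟩
      rcases (pvRank3_iff _).mp hr with h | h
      · simp only [Bool.or_eq_true]; exact Or.inl ((hmem _).mpr ⟨b, hb, h⟩)
      · simp only [Bool.or_eq_true]; exact Or.inr ((hmem _).mpr ⟨b, hb, h⟩)
    rw [if_pos hc, show M = 3 by omega]
    decide
  · have hnex3 : ¬ ∃ b ∈ l, 3 ≤ pvRank (pvSev b) := fun h => h3 ((hex 3 (by omega)).mpr h)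
    have hcF : ((l.map pvSev).contains "critical" || (l.map pvSev).contains "high") = false := by
      rw [Bool.or_eq_false_iff]
      constructor <;> (apply Bool.eq_false_iff.mpr; intro hc)
      · rcases (hmem _).mp hc with ⟨b, hb, h⟩
        exact hnex3 ⟨b, hb, (pvRank3_iff _).mpr (Or.inl h)⟩
      · rcases (hmem _).mp hc with ⟨b, hb, h⟩
        exact hnex3 ⟨b, hb, (pvRank3_iff _).mpr (Or.inr h)⟩
    rw [hcF]
    simp only [Bool.false_eq_true, if_false]
    by_cases h2 : 2 ≤ M
    · have hc : (l.map pvSev).contains "medium" = true := by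
        rcases (hex 2 (by omega)).mp h2 with ⟨b, hb, hr⟩
        rcases (pvRank2_iff _).mp hr with h | h | h
        · exact absurd ⟨b, hb, (pvRank3_iff _).mpr (Or.inl h)⟩ hnex3
        · exact absurd ⟨b, hb, (pvRank3_iff _).mpr (Or.inr h)⟩ hnex3
        · exact (hmem _).mpr ⟨b, hb, h⟩
      rw [if_pos hc, show M = 2 by omega]
      decide
    · have hnex2 : ¬ ∃ b ∈ l, 2 ≤ pvRank (pvSev b) := fun h => h2 ((hex 2 (by omega)).mpr h)
      have hmF : (l.map pvSev).contains "medium" = false := by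
        apply Bool.eq_false_iff.mpr; intro hc
        rcases (hmem _).mp hc with ⟨b, hb, h⟩
        exact hnex2 ⟨b, hb, (pvRank2_iff _).mpr (Or.inr (Or.inr h))⟩
      rw [hmF]
      simp only [Bool.false_eq_true, if_false]
      by_cases h1 : 1 ≤ M
      · have hc : (l.map pvSev).contains "low" = true := by
          rcases (hex 1 (by omega)).mp h1 with ⟨b, hb, hr⟩
          rcases (pvRank1_iff _).mp hr with h | h | h | h
          · exact absurd ⟨b, hb, (pvRank3_iff _).mpr (Or.inl h)⟩ hnex3
          · exact absurd ⟨b, hb, (pvRank3_iff _).mpr (Or.inr h)⟩ hnex3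
          · exact absurd ⟨b, hb, (pvRank2_iff _).mpr (Or.inr (Or.inr h))⟩ hnex2
          · exact (hmem _).mpr ⟨b, hb, h⟩
        rw [if_pos hc, show M = 1 by omega]
        decide
      · have hlF : (l.map pvSev).contains "low" = false := by
          apply Bool.eq_false_iff.mpr; intro hc
          rcases (hmem _).mp hc with ⟨b, hb, h⟩
          exact h1 ((hex 1 (by omega)).mpr ⟨b, hb, (pvRank1_iff _).mpr (Or.inr (Or.inr (Or.inr h)))⟩)
        rw [hlF]
        simp only [Bool.false_eq_true, if_false]
        rw [show M = 0 by omega]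
        decide
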